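-- pv_equiv track=rewrite | github.com/csp-inc/ikhnart | dacqre/dacqre/static/tools.py | determine_zfill
-- ===== SOURCE A (Python) =====
-- def determine_zfill(in_latlons):
--     zfill = 1
--     for oom in [9, 99, 999, 9999, 99999]:
--         if len(in_latlons) > oom:
--             zfill += 1
--         else:
--             return zfill
--     return zfill
-- ===== SOURCE B (Python) =====
-- def determine_zfill(in_latlons):
--     return min(len(str(len(in_latlons))), 6)
-- ===== Notes on version B (the rewrite author's own statement) =====
-- stated objective: simpler
-- what changed: Replaces the five-iteration threshold loop with a closed-form digit count: min(len(str(len(in_latlons))), 6).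
import Mathlib
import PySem

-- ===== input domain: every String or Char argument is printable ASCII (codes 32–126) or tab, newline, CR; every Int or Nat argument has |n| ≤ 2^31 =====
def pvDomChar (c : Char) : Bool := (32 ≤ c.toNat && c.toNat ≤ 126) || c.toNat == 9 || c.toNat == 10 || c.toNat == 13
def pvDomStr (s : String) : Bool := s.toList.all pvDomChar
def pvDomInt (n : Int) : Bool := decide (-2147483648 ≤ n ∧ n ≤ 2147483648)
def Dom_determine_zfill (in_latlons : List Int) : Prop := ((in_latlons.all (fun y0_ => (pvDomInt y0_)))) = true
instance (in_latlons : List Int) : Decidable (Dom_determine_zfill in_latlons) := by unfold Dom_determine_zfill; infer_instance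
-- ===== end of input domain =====

-- B replaces A's five-iteration threshold loop with the closed form min(len(str(len(xs))), 6); objective: simpler.

-- ===== PORT A =====
-- the 'for oom in [...]' loop with early return, as structural recursion over the literal list
def zfillLoop (n : Int) : List Int → Int → Int
  | [], z => z
  | oom :: rest, z => if n > oom then zfillLoop n rest (z + 1) else z

def determine_zfill (in_latlons : List Int) : Int :=
  zfillLoop (PySem.List.len in_latlons) [9, 99, 999, 9999, 99999] 1

-- ===== PORT B =====
def determine_zfill_alt (in_latlons : List Int) : Int :=
  min (PySem.Str.len (PySem.Int.toStr (PySem.List.len in_latlons))) 6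

-- ===== PRECONDITION & SPEC =====
def Spec_determine_zfill (in_latlons : List Int) (out : Int) : Prop := out = determine_zfill_alt in_latlons
instance (in_latlons : List Int) (out : Int) : Decidable (Spec_determine_zfill in_latlons out) := by unfold Spec_determine_zfill; infer_instance

-- ===== CLAIM (what is proved, stated in full; the proofs are below) =====
def Claim_equal_determine_zfill : Prop := ∀ (in_latlons : List Int), Dom_determine_zfill in_latlons → Spec_determine_zfill in_latlons (determine_zfill in_latlons)

-- ===== LEMMAS AND PROOFS =====

-- accumulator law for Nat.toDigitsCore lengths
lemma toDigitsCore_length_append (b f n : Nat) (l : List Char) :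
    (Nat.toDigitsCore b f n l).length = (Nat.toDigitsCore b f n []).length + l.length := by
  induction l with
  | nil => simp
  | cons c tl ih =>
      rw [Nat.toDigitsCore_lens_eq, ih, List.length_cons]
      omega

-- lower bound on the number of digits: b^e ≤ n (with enough fuel) forces length ≥ e+1
lemma toDigitsCore_length_lb (b : Nat) (hb : 1 < b) :
    ∀ (f e n : Nat), b ^ e ≤ n → e < f → e + 1 ≤ (Nat.toDigitsCore b f n []).length := by
  intro f
  induction f with
  | zero => intro e n _ h; omega
  | succ f ih =>
      intro e n hle hef
      cases e with
      | zero =>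
          simp only [Nat.toDigitsCore]
          split
          · simp
          · rw [toDigitsCore_length_append]; simp
      | succ e =>
          have hdiv : b ^ e ≤ n / b := by
            rw [Nat.le_div_iff_mul_le (by omega)]
            calc b ^ e * b = b ^ (e + 1) := by rw [pow_succ]
              _ ≤ n := hle
          have hne : n / b ≠ 0 := by
            have : 0 < b ^ e := pow_pos (by omega : 0 < b) e
            omega
          simp only [Nat.toDigitsCore, hne, if_false]
          rw [toDigitsCore_length_append]
          have := ih e (n / b) hdiv (by omega)
          simp only [List.length_cons, List.length_nil]
          omega

lemma toDigits_length_lb (b n e : Nat) (hb : 1 < b) (h : b ^ e ≤ n) :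
    e + 1 ≤ (Nat.toDigits b n).length := by
  have hef : e < n + 1 := by
    have h1 : e < b ^ e := Nat.lt_pow_self hb
    omega
  exact toDigitsCore_length_lb b hb (n + 1) e n h hef

-- exact digit count on a band: b^e ≤ n < b^(e+1) → length = e+1
lemma toDigits_length_band (n e : Nat) (hlo : 10 ^ e ≤ n) (hhi : n < 10 ^ (e + 1)) :
    (Nat.toDigits 10 n).length = e + 1 := by
  have h1 := Nat.toDigits_length 10 n (e + 1) (by omega) hhi
  have h2 := toDigits_length_lb 10 n e (by omega) hlo
  omega

lemma alt_len (in_latlons : List Int) :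
    determine_zfill_alt in_latlons
      = min ((Nat.toDigits 10 in_latlons.length : List Char).length : Int) 6 := by
  unfold determine_zfill_alt
  simp only [PySem.Str.len, PySem.List.len, PySem.Int.toStr, PySem.Int.toChars]
  rw [if_neg (by exact not_lt.mpr (Int.natCast_nonneg _))]
  simp

-- ===== VERDICT (by name: the statement is the Claim_ definition above) =====
theorem determine_zfill_spec : Claim_equal_determine_zfill := by
  intro xs _
  unfold Spec_determine_zfill
  rw [alt_len]
  unfold determine_zfill
  simp only [PySem.List.len]
  generalize xs.length = n
  by_cases h0 : n = 0
  · subst h0; decide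
  by_cases h1 : n < 10
  · have := toDigits_length_band n 0 (by omega) (by norm_num; omega)
    simp only [zfillLoop]
    rw [if_neg (by omega), this]
    norm_num
  by_cases h2 : n < 100
  · have := toDigits_length_band n 1 (by norm_num; omega) (by norm_num; omega)
    simp only [zfillLoop]
    rw [if_pos (by omega), if_neg (by omega), this]
    norm_num
  by_cases h3 : n < 1000
  · have := toDigits_length_band n 2 (by norm_num; omega) (by norm_num; omega)
    simp only [zfillLoop]
    rw [if_pos (by omega), if_pos (by omega),
        if_neg (by omega), this]
    norm_num
  by_cases h4 : n < 10000
  · have := toDigits_length_band n 3 (by norm_num; omega) (by norm_num; omega)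
    simp only [zfillLoop]
    rw [if_pos (by omega), if_pos (by omega),
        if_pos (by omega), if_neg (by omega), this]
    norm_num
  by_cases h5 : n < 100000
  · have := toDigits_length_band n 4 (by norm_num; omega) (by norm_num; omega)
    simp only [zfillLoop]
    rw [if_pos (by omega), if_pos (by omega),
        if_pos (by omega), if_pos (by omega),
        if_neg (by omega), this]
    norm_num
  · have := toDigits_length_lb 10 n 5 (by omega) (by norm_num; omega)
    simp only [zfillLoop]
    rw [if_pos (by omega), if_pos (by omega),
        if_pos (by omega), if_pos (by omega),
        if_pos (by omega)]
    omega
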